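-- pv_equiv track=rewrite | github.com/LoveBloodAndDiamonds/DDBacktest | app/__main__.py | _get_backtest_interval
-- ===== SOURCE A (Python) =====
-- def _get_backtest_interval(start_year, start_month, end_year, end_month) -> list[list[str]]:
--     # Создаем список всех месяцев в заданном временном интервале
--     months = []
--     for year in range(start_year, end_year + 1):
--         # Устанавливаем начальный и конечный месяц для текущего года
--         start = start_month if year == start_year else 1
--         end = end_month if year == end_year else 12
--         # Добавляем все месяцы в текущем году в список
--         for month in range(start, end + 1):
--             month = f"0{month}" if len(str(month)) == 1 else str(month)
--             months.append([str(year), month])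
--
--     return months
-- ===== SOURCE B (Python) =====
-- def _get_backtest_interval(start_year, start_month, end_year, end_month) -> list[list[str]]:
--     # Three-segment decomposition: literal first and last year, and one flat
--     # pass over absolute month indices for the full years in between.
--     def fmt(y, m):
--         s = str(m)
--         return [str(y), "0" + s if len(s) == 1 else s]
--
--     if end_year < start_year:
--         return []
--     if start_year == end_year:
--         return [fmt(start_year, m) for m in range(start_month, end_month + 1)]
--     return ([fmt(start_year, m) for m in range(start_month, 13)]
--             + [fmt(i // 12, i % 12 + 1) for i in range((start_year + 1) * 12, end_year * 12)]
--             + [fmt(end_year, m) for m in range(1, end_month + 1)])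
-- ===== Notes on version B (the rewrite author's own statement) =====
-- stated objective: alternative
-- what changed: Replaces the nested per-year/per-month loops with per-year start/end conditionals by a three-segment decomposition: the first and last year emitted literally and all full years in between produced by one flat loop over absolute month indices with divmod.
import Mathlib
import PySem

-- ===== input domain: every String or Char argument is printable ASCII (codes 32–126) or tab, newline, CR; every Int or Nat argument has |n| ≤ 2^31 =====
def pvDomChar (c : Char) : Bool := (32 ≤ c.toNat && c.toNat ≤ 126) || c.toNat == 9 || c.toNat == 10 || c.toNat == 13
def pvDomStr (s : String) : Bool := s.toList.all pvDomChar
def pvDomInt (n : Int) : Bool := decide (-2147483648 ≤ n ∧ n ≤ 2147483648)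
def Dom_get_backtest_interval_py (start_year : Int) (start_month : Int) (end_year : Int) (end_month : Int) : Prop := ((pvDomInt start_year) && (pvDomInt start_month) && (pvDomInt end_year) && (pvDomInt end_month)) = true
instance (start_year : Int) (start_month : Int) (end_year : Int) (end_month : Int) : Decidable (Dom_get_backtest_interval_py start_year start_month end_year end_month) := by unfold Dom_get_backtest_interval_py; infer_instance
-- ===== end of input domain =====

-- B replaces the nested per-year/per-month loops by a three-segment decomposition
-- (literal first/last year, flat divmod pass over the full years between); alternative decomposition, same cost.

-- ===== PORT A =====
def get_backtest_interval_py (start_year : Int) (start_month : Int) (end_year : Int) (end_month : Int) : List (List String) :=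
  (PySem.List.pyRange start_year (end_year + 1) 1).foldl (fun months year =>
    (PySem.List.pyRange (if year = start_year then start_month else 1)
        ((if year = end_year then end_month else 12) + 1) 1).foldl (fun months month =>
      months ++ [[PySem.Int.toStr year,
        if PySem.Str.len (PySem.Int.toStr month) = 1
        then "0" ++ PySem.Int.toStr month else PySem.Int.toStr month]]) months) []

-- ===== PORT B =====
-- Source B's helper fmt(y, m)
def pvFmt (y m : Int) : List String :=
  [PySem.Int.toStr y,
   if PySem.Str.len (PySem.Int.toStr m) = 1 then "0" ++ PySem.Int.toStr m else PySem.Int.toStr m]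

def get_backtest_interval_py_alt (start_year : Int) (start_month : Int) (end_year : Int) (end_month : Int) : List (List String) :=
  if end_year < start_year then []
  else if start_year = end_year then
    (PySem.List.pyRange start_month (end_month + 1) 1).map (pvFmt start_year)
  else
    ((PySem.List.pyRange start_month 13 1).map (pvFmt start_year))
      ++ ((PySem.List.pyRange ((start_year + 1) * 12) (end_year * 12) 1).map
            (fun i => pvFmt (PySem.Int.floordiv i 12) (PySem.Int.mod i 12 + 1)))
      ++ ((PySem.List.pyRange 1 (end_month + 1) 1).map (pvFmt end_year))

-- ===== PRECONDITION & SPEC =====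
def Spec_get_backtest_interval_py (start_year : Int) (start_month : Int) (end_year : Int) (end_month : Int) (out : List (List String)) : Prop := out = get_backtest_interval_py_alt start_year start_month end_year end_month
instance (start_year : Int) (start_month : Int) (end_year : Int) (end_month : Int) (out : List (List String)) : Decidable (Spec_get_backtest_interval_py start_year start_month end_year end_month out) := by unfold Spec_get_backtest_interval_py; infer_instance

-- ===== CLAIM (what is proved, stated in full; the proofs are below) =====
def Claim_equal_get_backtest_interval_py : Prop := ∀ (start_year : Int) (start_month : Int) (end_year : Int) (end_month : Int), Dom_get_backtest_interval_py start_year start_month end_year end_month → Spec_get_backtest_interval_py start_year start_month end_year end_month (get_backtest_interval_py start_year start_month end_year end_month)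

-- ===== LEMMAS AND PROOFS =====

lemma pvA_eq (sy sm ey em : Int) :
    get_backtest_interval_py sy sm ey em =
      (PySem.List.pyRange sy (ey + 1) 1).flatMap (fun y =>
        (PySem.List.pyRange (if y = sy then sm else 1) ((if y = ey then em else 12) + 1) 1).map (pvFmt y)) := by
  unfold get_backtest_interval_py
  have h1 : (fun (months : List (List String)) (year : Int) =>
      (PySem.List.pyRange (if year = sy then sm else 1) ((if year = ey then em else 12) + 1) 1).foldl
        (fun months month =>
          months ++ [[PySem.Int.toStr year,
            if PySem.Str.len (PySem.Int.toStr month) = 1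
            then "0" ++ PySem.Int.toStr month else PySem.Int.toStr month]]) months)
      = (fun months year => months ++
          (PySem.List.pyRange (if year = sy then sm else 1) ((if year = ey then em else 12) + 1) 1).map (pvFmt year)) := by
    funext months year
    exact PySem.List.foldl_append_singleton_eq_map _ _ _
  rw [h1, PySem.List.foldl_append_eq_flatMap]
  simp

-- one full year y, as A formats it, equals B's flat-index entries for year y
lemma pvYear (y : Int) :
    (PySem.List.pyRange 1 13 1).map (pvFmt y) =
      (PySem.List.pyRange (y * 12) (y * 12 + 12) 1).map
        (fun i => pvFmt (PySem.Int.floordiv i 12) (PySem.Int.mod i 12 + 1)) := by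
  rw [PySem.List.pyRange_one 1 13, PySem.List.pyRange_one (y * 12) (y * 12 + 12)]
  have hlen : (y * 12 + 12 - y * 12).toNat = ((13 : Int) - 1).toNat := by omega
  rw [hlen, List.map_map, List.map_map]
  apply List.map_congr_left
  intro k hk
  have hk' : (k : Int) < 12 := by
    have := List.mem_range.mp hk
    omega
  simp only [Function.comp]
  have hdiv : PySem.Int.floordiv (y * 12 + (k : Int)) 12 = y := by
    rw [PySem.Int.floordiv_eq_iff_of_pos (by norm_num)]
    omega
  have hmod : PySem.Int.mod (y * 12 + (k : Int)) 12 = (k : Int) := by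
    have h := PySem.Int.floordiv_mul_add_mod (y * 12 + (k : Int)) 12
    rw [hdiv] at h
    omega
  rw [hdiv, hmod]
  have h2 : (1 : Int) + (k : Int) = (k : Int) + 1 := by ring
  rw [h2]

-- the middle block: consecutive full years a..b-1 flatten to one flat index range
lemma pvMid (n : Nat) : ∀ a b : Int, (b - a).toNat = n →
    (PySem.List.pyRange a b 1).flatMap (fun y => (PySem.List.pyRange 1 13 1).map (pvFmt y)) =
      (PySem.List.pyRange (a * 12) (b * 12) 1).map
        (fun i => pvFmt (PySem.Int.floordiv i 12) (PySem.Int.mod i 12 + 1)) := by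
  induction n with
  | zero =>
    intro a b hn
    have hba : b ≤ a := by omega
    rw [PySem.List.pyRange_one_eq_nil hba,
        PySem.List.pyRange_one_eq_nil (mul_le_mul_of_nonneg_right hba (by norm_num))]
    simp
  | succ n ih =>
    intro a b hn
    rw [PySem.List.pyRange_one_cons (by omega : a < b)]
    rw [List.flatMap_cons, pvYear a, ih (a + 1) b (by omega)]
    have h1 : (a + 1) * 12 = a * 12 + 12 := by ring
    rw [h1, ← List.map_append,
        ← PySem.List.pyRange_one_append (a * 12) (a * 12 + 12) (b * 12) (by omega) (by omega)]

-- ===== VERDICT (by name: the statement is the Claim_ definition above) =====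
theorem get_backtest_interval_py_spec : Claim_equal_get_backtest_interval_py := by
  intro sy sm ey em _hdom
  unfold Spec_get_backtest_interval_py get_backtest_interval_py_alt
  rw [pvA_eq]
  by_cases hlt : ey < sy
  · rw [if_pos hlt, PySem.List.pyRange_one_eq_nil (by omega)]
    simp
  · rw [if_neg hlt]
    by_cases heq : sy = ey
    · subst heq
      rw [if_pos rfl, PySem.List.pyRange_one_singleton]
      simp
    · rw [if_neg heq]
      have hlt' : sy < ey := by omega
      rw [PySem.List.pyRange_one_cons (by omega : sy < ey + 1),
          PySem.List.pyRange_one_succ_right (by omega : sy + 1 ≤ ey)]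
      rw [List.flatMap_cons, List.flatMap_append, List.flatMap_cons, List.flatMap_nil,
          List.append_nil]
      rw [if_pos rfl, if_neg heq, if_neg (by omega : ¬ ey = sy), if_pos rfl]
      have hcongr : (PySem.List.pyRange (sy + 1) ey 1).flatMap (fun y =>
          (PySem.List.pyRange (if y = sy then sm else 1) ((if y = ey then em else 12) + 1) 1).map (pvFmt y)) =
          (PySem.List.pyRange (sy + 1) ey 1).flatMap (fun y =>
          (PySem.List.pyRange 1 13 1).map (pvFmt y)) := by
        apply List.flatMap_congr
        intro y hy
        have hy' := PySem.List.mem_pyRange_one.mp hy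
        rw [if_neg (by omega : ¬ y = sy), if_neg (by omega : ¬ y = ey)]
        norm_num
      rw [hcongr, pvMid (ey - (sy + 1)).toNat (sy + 1) ey rfl]
      have h12 : (12 : Int) + 1 = 13 := by norm_num
      rw [h12, List.append_assoc]
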